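-- pv_equiv track=rewrite | github.com/AbhiSaphire/Competitive-Programming-Solutions | Contest/Google_Online_Test_2020.py | distPrime
-- ===== SOURCE A (Python) =====
-- def distPrime(arr, allPrimes):
-- 	list1 = list()
-- 	for i in allPrimes:
-- 		check = True
-- 		for j in arr:
-- 			if(j % i != 0):
-- 				check = False
-- 		if check:
-- 			list1.append(i)
-- 	return len(list1)
-- ===== SOURCE B (Python) =====
-- def _gcd(a, b):
--     a, b = abs(a), abs(b)
--     while b:
--         a, b = b, a % b
--     return a
--
-- def distPrime(arr, allPrimes):
--     g = 0
--     for x in arr: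
--         g = _gcd(g, x)
--     return sum(1 for p in allPrimes if g % p == 0)
-- ===== Notes on version B (the rewrite author's own statement) =====
-- stated objective: faster
-- what changed: Instead of testing every prime against every array element (nested loops), B folds the array once into its gcd and then counts the primes dividing that single gcd.
-- outside the precondition, e.g. on distPrime([], [0, 3]): A returns 2, B raises ZeroDivisionError
import Mathlib
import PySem

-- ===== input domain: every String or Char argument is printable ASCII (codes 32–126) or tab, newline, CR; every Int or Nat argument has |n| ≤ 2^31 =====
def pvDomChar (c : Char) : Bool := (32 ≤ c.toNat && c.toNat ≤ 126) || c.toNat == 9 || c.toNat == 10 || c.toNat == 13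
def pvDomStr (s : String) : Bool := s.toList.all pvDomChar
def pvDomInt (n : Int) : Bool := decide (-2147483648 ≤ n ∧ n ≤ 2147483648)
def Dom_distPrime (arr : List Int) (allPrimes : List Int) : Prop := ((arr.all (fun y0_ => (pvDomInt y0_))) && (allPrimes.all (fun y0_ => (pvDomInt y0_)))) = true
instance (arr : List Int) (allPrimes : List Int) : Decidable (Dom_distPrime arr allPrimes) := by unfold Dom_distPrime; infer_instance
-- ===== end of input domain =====

-- B replaces A's prime-by-element nested loops with one gcd fold over the array
-- followed by a single divisibility count over the primes (objective: faster).


-- ===== PORT A =====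
def distPrime (arr : List Int) (allPrimes : List Int) : Int :=
  let list1 : List Int :=
    allPrimes.foldl (fun list1 i =>
      let check :=
        arr.foldl (fun check j => if PySem.Int.mod j i ≠ 0 then false else check) true
      if check then list1 ++ [i] else list1) []
  (list1.length : Int)

-- ===== PORT B =====
-- Euclid's loop from Source B's _gcd (on absolute values)
def gcdLoop (a b : Nat) : Nat :=
  if h : b = 0 then a else gcdLoop b (a % b)
decreasing_by exact Nat.mod_lt _ (Nat.pos_of_ne_zero h)

def pyGcd (a b : Int) : Int := (gcdLoop a.natAbs b.natAbs : Int)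

def distPrime_alt (arr : List Int) (allPrimes : List Int) : Int :=
  let g := arr.foldl (fun g x => pyGcd g x) 0
  ((allPrimes.countP (fun p => PySem.Int.mod g p == 0)) : Int)

-- ===== PRECONDITION & SPEC =====
-- Pre_ excludes a zero entry in allPrimes: there both Pythons raise ZeroDivisionError except
-- when arr is empty, where A skips the inner loop and returns while B's g % 0 still raises.
def Pre_distPrime (arr : List Int) (allPrimes : List Int) : Prop := (0 : Int) ∉ allPrimes
instance (arr : List Int) (allPrimes : List Int) : Decidable (Pre_distPrime arr allPrimes) := by unfold Pre_distPrime; infer_instance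
def pvWitness_distPrime : List Int × List Int := ([6, 12, 30], [2, 3, 5, 7])

def Spec_distPrime (arr : List Int) (allPrimes : List Int) (out : Int) : Prop := out = distPrime_alt arr allPrimes
instance (arr : List Int) (allPrimes : List Int) (out : Int) : Decidable (Spec_distPrime arr allPrimes out) := by unfold Spec_distPrime; infer_instance

-- ===== CLAIM (what is proved, stated in full; the proofs are below) =====
def Claim_equal_distPrime : Prop := ∀ (arr : List Int) (allPrimes : List Int), Dom_distPrime arr allPrimes → Pre_distPrime arr allPrimes → Spec_distPrime arr allPrimes (distPrime arr allPrimes)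

-- ===== LEMMAS AND PROOFS =====

-- the hand-written Euclid loop is Nat.gcd
theorem gcdLoop_eq_gcd (a b : Nat) : gcdLoop a b = Nat.gcd a b := by
  induction b using Nat.strong_induction_on generalizing a with
  | _ b ih =>
      rw [gcdLoop]
      by_cases h : b = 0
      · simp [h]
      · simp only [h, dite_false]
        rw [ih (a % b) (Nat.mod_lt _ (Nat.pos_of_ne_zero h)) b,
          Nat.gcd_comm b (a % b), ← Nat.gcd_rec, Nat.gcd_comm]

theorem dvd_pyGcd_iff (p a b : Int) : p ∣ pyGcd a b ↔ p ∣ a ∧ p ∣ b := by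
  unfold pyGcd
  rw [gcdLoop_eq_gcd, ← Int.natAbs_dvd_natAbs, Int.natAbs_natCast,
    Nat.dvd_gcd_iff, Int.natAbs_dvd_natAbs, Int.natAbs_dvd_natAbs]

-- the gcd fold accumulates exactly "divides the accumulator and every element"
theorem dvd_foldl_gcd_iff (p : Int) (arr : List Int) :
    ∀ g0 : Int, (p ∣ arr.foldl (fun g x => pyGcd g x) g0 ↔ p ∣ g0 ∧ ∀ j ∈ arr, p ∣ j) := by
  induction arr with
  | nil => intro g0; simp
  | cons x xs ih =>
      intro g0
      simp only [List.foldl_cons, ih, dvd_pyGcd_iff, List.mem_cons]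
      constructor
      · rintro ⟨⟨h1, h2⟩, h3⟩
        exact ⟨h1, fun j hj => hj.elim (fun e => e ▸ h2) (h3 j)⟩
      · rintro ⟨h1, h2⟩
        exact ⟨⟨h1, h2 x (Or.inl rfl)⟩, fun j hj => h2 j (Or.inr hj)⟩

-- A's inner check loop computes "every element divisible by i"
theorem check_foldl_eq (i : Int) (arr : List Int) :
    ∀ c : Bool, arr.foldl (fun check j => if PySem.Int.mod j i ≠ 0 then false else check) c
      = (c && arr.all (fun j => PySem.Int.mod j i == 0)) := by
  induction arr with
  | nil => intro c; simp
  | cons x xs ih =>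
      intro c
      simp only [List.foldl_cons, List.all_cons, ih]
      by_cases h : PySem.Int.mod x i = 0
      · simp [h]
      · simp [h]

-- A's conditional-append fold counts the primes passing the check
theorem foldl_append_length (P : Int → Bool) (l : List Int) :
    ∀ acc : List Int,
      ((l.foldl (fun list1 i => if P i then list1 ++ [i] else list1) acc).length : Int)
        = (acc.length : Int) + (l.countP P : Int) := by
  induction l with
  | nil => intro acc; simp
  | cons x xs ih =>
      intro acc
      simp only [List.foldl_cons, List.countP_cons]
      by_cases h : P x = true
      · simp [h, ih, List.length_append]; ring
      · simp [Bool.not_eq_true] at h; simp [h, ih]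

-- ===== VERDICT (by name: the statement is the Claim_ definition above) =====
theorem distPrime_spec : Claim_equal_distPrime := by
  intro arr allPrimes _ _
  unfold Spec_distPrime distPrime distPrime_alt
  rw [foldl_append_length]
  simp only [List.length_nil, Nat.cast_zero, zero_add, Int.ofNat_inj]
  apply List.countP_congr
  intro p hp
  rw [check_foldl_eq, Bool.true_and]
  simp only [List.all_eq_true, beq_iff_eq, PySem.Int.mod_eq_zero_iff_dvd,
    dvd_foldl_gcd_iff p arr 0]
  simp
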